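-- pv_equiv track=rewrite | github.com/moffergeld/mvv-sync | pages/02_Match_Reports.py | _series_rank_colors
-- ===== SOURCE A (Python) =====
-- from typing import Any, Dict, List, Optional, Tuple
--
-- def _series_rank_colors(n: int) -> List[str]:
--     palette = [
--         "#FF335C",
--         "#F42B56",
--         "#E1224C",
--         "#CB1A42",
--         "#B7143A",
--         "#A11134",
--         "#8B0F2E",
--     ]
--     if n <= len(palette):
--         return palette[:n]
--     return [palette[min(i, len(palette) - 1)] for i in range(n)]
-- ===== SOURCE B (Python) =====
-- from typing import List
--
-- def _series_rank_colors(n: int) -> List[str]: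
--     palette = [
--         "#FF335C",
--         "#F42B56",
--         "#E1224C",
--         "#CB1A42",
--         "#B7143A",
--         "#A11134",
--         "#8B0F2E",
--     ]
--     # consume the palette one color per step; once one color remains, keep emitting it
--     out: List[str] = []
--     pal = palette
--     k = n
--     while k > 0:
--         out.append(pal[0])
--         if len(pal) > 1:
--             pal = pal[1:]
--         k -= 1
--     return out
-- ===== Notes on version B (the rewrite author's own statement) =====
-- stated objective: alternative
-- what changed: Replaces the clamped-index comprehension (palette[min(i, len-1)] for i in range(n)) by a structural recursion that consumes the palette itself, popping one color per step and holding the final color once the palette is down to one element; no indexing or clamping remains.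
-- intended difference: For -6 <= n <= -1, A's palette[:n] negative-slice wraparound returns a nonempty prefix of the palette, while B returns []; a negative count of rank colors should yield no colors. — e.g. on _series_rank_colors(-2): A returns ["#FF335C", "#F42B56", "#E1224C", "#CB1A42", "#B7143A"], B returns []
import Mathlib
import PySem

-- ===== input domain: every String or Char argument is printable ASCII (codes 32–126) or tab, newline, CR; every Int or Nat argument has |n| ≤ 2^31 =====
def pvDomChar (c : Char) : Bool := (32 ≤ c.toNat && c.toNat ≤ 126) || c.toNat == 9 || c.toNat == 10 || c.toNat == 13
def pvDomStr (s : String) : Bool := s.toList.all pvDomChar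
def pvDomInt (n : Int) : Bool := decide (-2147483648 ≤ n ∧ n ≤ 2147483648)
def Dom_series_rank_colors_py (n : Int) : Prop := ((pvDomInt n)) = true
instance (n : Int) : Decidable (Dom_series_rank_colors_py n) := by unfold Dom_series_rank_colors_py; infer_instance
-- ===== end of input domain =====

-- B replaces A's clamped-index comprehension by a structural recursion that consumes the
-- palette, popping one color per step and holding the last color once one element remains;
-- for negative n it naturally returns [] where A's negative slice returns a prefix (see D_).

-- ===== PORT A =====
def pvPalette : List String :=
  ["#FF335C", "#F42B56", "#E1224C", "#CB1A42", "#B7143A", "#A11134", "#8B0F2E"]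

def series_rank_colors_py (n : Int) : List String :=
  if n ≤ (pvPalette.length : Int) then
    PySem.List.slice pvPalette none (some n)
  else
    (PySem.List.pyRange 0 n 1).map
      (fun i => PySem.List.pyGetD pvPalette (min i ((pvPalette.length : Int) - 1)) "")

-- ===== PORT B =====
-- inner recursion 'go' of Source B: consume the palette, keep the last color when pal has one left
def srcGo (pal : List String) (k : Nat) : List String :=
  match k, pal with
  | 0, _ => []
  | _ + 1, [] => []   -- unreachable: Source B is only called with a nonempty pal
  | k + 1, head :: rest =>
      head :: srcGo (if rest.isEmpty then head :: rest else rest) k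

def series_rank_colors_py_alt (n : Int) : List String :=
  srcGo pvPalette n.toNat   -- 'if k <= 0: return []' means only max(0,n) steps happen

-- ===== PRECONDITION & SPEC =====
-- For -6 ≤ n ≤ -1, A's palette[:n] negative-slice wraparound returns a nonempty prefix
-- of the palette, while B returns []; a negative count of rank colors should yield no colors.
def D_series_rank_colors_py (n : Int) : Prop := -6 ≤ n ∧ n ≤ -1
instance (n : Int) : Decidable (D_series_rank_colors_py n) := by unfold D_series_rank_colors_py; infer_instance
def Spec_series_rank_colors_py (n : Int) (out : List String) : Prop := ¬ D_series_rank_colors_py n → out = series_rank_colors_py_alt n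
instance (n : Int) (out : List String) : Decidable (Spec_series_rank_colors_py n out) := by unfold Spec_series_rank_colors_py; infer_instance
def pvDiffWitness_series_rank_colors_py : Int := -2
def pvDiffWitnessOut_series_rank_colors_py : (List String) × (List String) :=
  (["#FF335C", "#F42B56", "#E1224C", "#CB1A42", "#B7143A"], [])

-- ===== CLAIM =====
def Claim_unchanged_series_rank_colors_py : Prop := ∀ (n : Int), Dom_series_rank_colors_py n → Spec_series_rank_colors_py n (series_rank_colors_py n)
def Claim_changed_series_rank_colors_py : Prop := Dom_series_rank_colors_py (pvDiffWitness_series_rank_colors_py) ∧ D_series_rank_colors_py (pvDiffWitness_series_rank_colors_py) ∧ series_rank_colors_py (pvDiffWitness_series_rank_colors_py) = pvDiffWitnessOut_series_rank_colors_py.1 ∧ series_rank_colors_py_alt (pvDiffWitness_series_rank_colors_py) = pvDiffWitnessOut_series_rank_colors_py.2 ∧ pvDiffWitnessOut_series_rank_colors_py.1 ≠ pvDiffWitnessOut_series_rank_colors_py.2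
def Claim_exact_series_rank_colors_py : Prop := ∀ (n : Int), Dom_series_rank_colors_py n → D_series_rank_colors_py n → series_rank_colors_py n ≠ series_rank_colors_py_alt n

-- ===== LEMMAS AND PROOFS =====

-- B's recursion on a one-color palette just repeats that color.
theorem srcGo_single (c : String) : ∀ (m : Nat), srcGo [c] m = List.replicate m c
  | 0 => rfl
  | m + 1 => by simp [srcGo, srcGo_single c m, List.replicate_succ]

-- B's recursion, started on any nonempty palette, yields the prefix then repeats the last color.
theorem srcGo_spec (m : Nat) : ∀ (c : String) (pal : List String),
    srcGo (c :: pal) m = (c :: pal).take m ++ List.replicate (m - (c :: pal).length) ((c :: pal).getLast (by simp)) := by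
  induction m with
  | zero => intro c pal; simp [srcGo]
  | succ m ih =>
    intro c pal
    cases pal with
    | nil =>
      rw [srcGo_single c (m + 1)]
      simp [List.replicate_succ]
    | cons d rest =>
      have hstep : srcGo (c :: d :: rest) (m + 1) = c :: srcGo (d :: rest) m := by
        simp [srcGo]
      rw [hstep, ih d rest]
      simp [List.getLast_cons, Nat.succ_sub_succ]

-- A's comprehension over range(m), for m ≥ 7, is the full palette followed by the last color repeated.
theorem pv_map_range (m : Nat) (hm : 7 ≤ m) :
    (List.range m).map (fun k : Nat => PySem.List.pyGetD pvPalette (min ((k : Int)) 6) "")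
      = pvPalette ++ List.replicate (m - 7) "#8B0F2E" := by
  induction m with
  | zero => omega
  | succ m ih =>
    rcases Nat.lt_or_ge m 7 with h | h
    · have hm6 : m = 6 := by omega
      subst hm6; decide
    · rw [List.range_succ, List.map_append, ih h, List.map_singleton]
      have h6 : min ((m : Int)) 6 = 6 := by omega
      rw [h6]
      have h7 : m + 1 - 7 = (m - 7) + 1 := by omega
      rw [h7, List.replicate_succ', List.append_assoc]
      rfl

theorem series_rank_colors_py_eq (n : Int) (hD : ¬ D_series_rank_colors_py n) :
    series_rank_colors_py n = series_rank_colors_py_alt n := by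
  unfold series_rank_colors_py series_rank_colors_py_alt D_series_rank_colors_py at *
  have hlen : ((pvPalette.length : Int)) = 7 := by norm_num [pvPalette]
  by_cases h : n ≤ (pvPalette.length : Int)
  · rw [if_pos h]
    rw [hlen] at h
    by_cases h0 : n ≤ 0
    · -- n ≤ -7 or n = 0: A's slice is empty, B takes 0 steps
      have hn : n ≤ -7 ∨ n = 0 := by omega
      have hto : n.toNat = 0 := by omega
      rw [hto]
      rcases hn with h7 | h7
      · obtain ⟨k, rfl⟩ : ∃ k : Nat, n = -(k : Int) := ⟨(-n).toNat, by omega⟩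
        rw [PySem.List.slice_to_neg_natCast _ _ (by omega : 0 < k)]
        have hz : pvPalette.length - k = 0 := by
          have : pvPalette.length = 7 := by norm_num [pvPalette]
          omega
        rw [hz]
        simp [srcGo]
      · subst h7; decide
    · -- 1 ≤ n ≤ 7
      obtain ⟨m, rfl⟩ : ∃ m : Nat, n = (m : Int) := ⟨n.toNat, (Int.toNat_of_nonneg (by omega)).symm⟩
      rw [PySem.List.slice_to_natCast, Int.toNat_natCast]
      rcases hEq : pvPalette with _ | ⟨c, pal⟩
      · simp [pvPalette] at hEq
      · rw [srcGo_spec]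
        have : m - (c :: pal).length = 0 := by
          have h7 : (c :: pal).length = 7 := by rw [← hEq]; norm_num [pvPalette]
          omega
        rw [this, List.replicate_zero, List.append_nil]
  · rw [if_neg h]
    rw [hlen] at h
    obtain ⟨m, rfl⟩ : ∃ m : Nat, n = (m : Int) := ⟨n.toNat, (Int.toNat_of_nonneg (by omega)).symm⟩
    have hm7 : 7 ≤ m := by omega
    rw [hlen, PySem.List.pyRange_zero_natCast, List.map_map]
    have hfun : ((fun i => PySem.List.pyGetD pvPalette (min i ((7:Int) - 1)) "") ∘ fun k : Nat => ((k : Int)))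
        = fun k : Nat => PySem.List.pyGetD pvPalette (min ((k : Int)) 6) "" := by
      funext k; norm_num
    rw [hfun, pv_map_range m hm7, Int.toNat_natCast]
    rcases hEq : pvPalette with _ | ⟨c, pal⟩
    · simp [pvPalette] at hEq
    · rw [srcGo_spec]
      have h1 : (c :: pal).take m = c :: pal := by
        apply List.take_of_length_le
        have : (c :: pal).length = 7 := by rw [← hEq]; norm_num [pvPalette]
        omega
      have h2 : m - (c :: pal).length = m - 7 := by
        have : (c :: pal).length = 7 := by rw [← hEq]; norm_num [pvPalette]
        omega
      have h3 : (c :: pal).getLast (by simp) = "#8B0F2E" := by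
        have := hEq
        simp [pvPalette] at this
        obtain ⟨rfl, rfl⟩ := this
        decide
      rw [h1, h2, h3]

-- ===== VERDICT =====
theorem series_rank_colors_py_spec : Claim_unchanged_series_rank_colors_py := by
  intro n _ hD
  exact series_rank_colors_py_eq n hD
theorem series_rank_colors_py_changed : Claim_changed_series_rank_colors_py := by
  unfold Claim_changed_series_rank_colors_py; decide
theorem series_rank_colors_py_tight : Claim_exact_series_rank_colors_py := by
  intro n _ hD
  unfold D_series_rank_colors_py at hD
  obtain ⟨h1, h2⟩ := hD
  interval_cases n <;> decide
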